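-- pv_equiv track=rewrite | github.com/salvadorlab/MinION_Transcriptome | find_tu.py | get_cluster_pos
-- ===== SOURCE A (Python) =====
-- def get_cluster_pos(read_list, strand):
--     if strand == "lead":
--         cluster_start = min([x[0] for x in read_list])
--         cluster_end = max([x[1] for x in read_list])
--     else:
--         cluster_start = max([x[0] for x in read_list])
--         cluster_end = min([x[1] for x in read_list])
--
--     return cluster_start, cluster_end
-- ===== SOURCE B (Python) =====
-- def get_cluster_pos(read_list, strand):
--     by_start = sorted(read_list, key=lambda x: x[0])
--     by_end = sorted(read_list, key=lambda x: x[1])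
--     if strand == "lead":
--         return by_start[0][0], by_end[-1][1]
--     else:
--         return by_start[-1][0], by_end[0][1]
-- ===== Notes on version B (the rewrite author's own statement) =====
-- stated objective: alternative
-- what changed: Replaces A's strand-dependent min/max scans over comprehensions with a sort-based selection: sort the reads by start and by end coordinate, then pick the first or last element of each sorted list according to strand; trades A's O(n) scans for O(n log n) sorting in exchange for a different algorithmic mechanism (order statistics via sorting).
import Mathlib
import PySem

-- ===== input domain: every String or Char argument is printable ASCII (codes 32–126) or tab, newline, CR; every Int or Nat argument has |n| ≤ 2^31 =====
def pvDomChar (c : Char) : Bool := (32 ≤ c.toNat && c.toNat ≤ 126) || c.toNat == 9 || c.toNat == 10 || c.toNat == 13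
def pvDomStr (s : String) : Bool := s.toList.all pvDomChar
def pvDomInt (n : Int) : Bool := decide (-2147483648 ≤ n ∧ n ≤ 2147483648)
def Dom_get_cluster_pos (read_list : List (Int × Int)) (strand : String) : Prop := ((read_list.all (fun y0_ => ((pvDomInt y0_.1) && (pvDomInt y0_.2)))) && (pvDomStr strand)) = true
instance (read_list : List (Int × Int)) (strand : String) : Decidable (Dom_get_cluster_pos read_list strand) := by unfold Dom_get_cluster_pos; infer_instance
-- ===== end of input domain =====

-- B replaces A's min/max scans with sort-based selection (sort by start / by end, pick first or last element); alternative algorithm, same results; both raise on an empty read_list (excluded by Pre_).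


-- ===== PORT A =====
-- min([...])/max([...]) raise ValueError on []: PySem.List.min?/max? return none there; the .getD 0 is only reached outside Pre_.
def get_cluster_pos (read_list : List (Int × Int)) (strand : String) : Int × Int :=
  if strand == "lead" then
    ((PySem.List.min? (read_list.map (fun x : Int × Int => x.1)) (fun y => y)).getD 0,
     (PySem.List.max? (read_list.map (fun x : Int × Int => x.2)) (fun y => y)).getD 0)
  else
    ((PySem.List.max? (read_list.map (fun x : Int × Int => x.1)) (fun y => y)).getD 0,
     (PySem.List.min? (read_list.map (fun x : Int × Int => x.2)) (fun y => y)).getD 0)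

-- ===== PORT B =====
-- sorted(read_list, key=...) is PySem.List.sorted; by_start[0] / by_end[-1] raise IndexError on []:
-- PySem.List.pyGetD with default (0,0), only reached outside Pre_.
def get_cluster_pos_alt (read_list : List (Int × Int)) (strand : String) : Int × Int :=
  let by_start := PySem.List.sorted read_list (fun x : Int × Int => x.1) false
  let by_end := PySem.List.sorted read_list (fun x : Int × Int => x.2) false
  if strand == "lead" then
    ((PySem.List.pyGetD by_start 0 (0, 0)).1, (PySem.List.pyGetD by_end (-1) (0, 0)).2)
  else
    ((PySem.List.pyGetD by_start (-1) (0, 0)).1, (PySem.List.pyGetD by_end 0 (0, 0)).2)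

-- ===== PRECONDITION & SPEC =====
-- On [] both A and B raise (A: ValueError from min/max of empty; B: IndexError from [0]); excluded.
def Pre_get_cluster_pos (read_list : List (Int × Int)) (strand : String) : Prop := read_list ≠ []
instance (read_list : List (Int × Int)) (strand : String) : Decidable (Pre_get_cluster_pos read_list strand) := by unfold Pre_get_cluster_pos; infer_instance
def pvWitness_get_cluster_pos : (List (Int × Int)) × String := ([(1, 5), (2, 4)], "lead")

def Spec_get_cluster_pos (read_list : List (Int × Int)) (strand : String) (out : Int × Int) : Prop := out = get_cluster_pos_alt read_list strand
instance (read_list : List (Int × Int)) (strand : String) (out : Int × Int) : Decidable (Spec_get_cluster_pos read_list strand out) := by unfold Spec_get_cluster_pos; infer_instance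

-- ===== CLAIM (what is proved, stated in full; the proofs are below) =====
def Claim_equal_get_cluster_pos : Prop := ∀ (read_list : List (Int × Int)) (strand : String), Dom_get_cluster_pos read_list strand → Pre_get_cluster_pos read_list strand → Spec_get_cluster_pos read_list strand (get_cluster_pos read_list strand)

-- ===== LEMMAS AND PROOFS =====

-- min over the mapped keys = key of the head of the sorted list
theorem min_eq_sorted_head (l : List (Int × Int)) (key : Int × Int → Int) (h : l ≠ []) :
    (PySem.List.min? (l.map key) (fun y => y)).getD 0
      = key (PySem.List.pyGetD (PySem.List.sorted l key false) 0 (0, 0)) := by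
  obtain ⟨m, t, hs⟩ : ∃ m t, PySem.List.sorted l key false = m :: t := by
    rcases hsort : PySem.List.sorted l key false with _ | ⟨m, t⟩
    · exact absurd ((PySem.List.sorted_eq_nil_iff _ _ _).1 hsort) h
    · exact ⟨m, t, rfl⟩
  rw [hs, PySem.List.pyGetD_zero_cons]
  rcases hmin : PySem.List.min? (l.map key) (fun y => y) with _ | v
  · rw [PySem.List.min?_eq_none_iff] at hmin
    exact absurd (List.map_eq_nil_iff.1 hmin) h
  · have hvmem := PySem.List.min?_mem hmin
    obtain ⟨y0, hy0, hy0v⟩ := List.mem_map.1 hvmem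
    have hmle : key m ≤ v := by
      subst hy0v
      exact PySem.List.key_head_sorted_le l key hs y0 hy0
    have hvle : v ≤ key m := by
      have hm : m ∈ l := (PySem.List.mem_sorted _ _ _ _).1 (hs ▸ List.mem_cons_self ..)
      exact PySem.List.min?_isMin hmin (key m) (List.mem_map.2 ⟨m, hm, rfl⟩)
    simp [le_antisymm hvle hmle]

-- max over the mapped keys = key of the last of the sorted list
theorem max_eq_sorted_last (l : List (Int × Int)) (key : Int × Int → Int) (h : l ≠ []) :
    (PySem.List.max? (l.map key) (fun y => y)).getD 0
      = key (PySem.List.pyGetD (PySem.List.sorted l key false) (-1) (0, 0)) := by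
  have hsne : PySem.List.sorted l key false ≠ [] := by
    intro hnil; exact h ((PySem.List.sorted_eq_nil_iff _ _ _).1 hnil)
  rw [PySem.List.pyGetD_neg_one _ _ hsne]
  rcases hmax : PySem.List.max? (l.map key) (fun y => y) with _ | v
  · rw [PySem.List.max?_eq_none_iff] at hmax
    exact absurd (List.map_eq_nil_iff.1 hmax) h
  · have hlast_mem : (PySem.List.sorted l key false).getLast hsne ∈ l :=
      (PySem.List.mem_sorted _ _ _ _).1 (List.getLast_mem hsne)
    have hle : key ((PySem.List.sorted l key false).getLast hsne) ≤ v :=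
      PySem.List.max?_isMax hmax _ (List.mem_map.2 ⟨_, hlast_mem, rfl⟩)
    have hge : v ≤ key ((PySem.List.sorted l key false).getLast hsne) := by
      have hvmem := PySem.List.max?_mem hmax
      obtain ⟨y0, hy0, hy0v⟩ := List.mem_map.1 hvmem
      subst hy0v
      have hy0s : y0 ∈ PySem.List.sorted l key false := (PySem.List.mem_sorted _ _ _ _).2 hy0
      obtain ⟨p, hp, hpy⟩ := List.mem_iff_getElem.1 hy0s
      have hlen : 0 < (PySem.List.sorted l key false).length := List.length_pos_iff.2 hsne
      have hmono := PySem.List.key_sorted_getElem_mono (xs := l) (key := key)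
        (p := p) (q := (PySem.List.sorted l key false).length - 1)
        (by omega) (by omega)
      rw [hpy] at hmono
      rwa [List.getLast_eq_getElem hsne]
    simp [le_antisymm hge hle]

-- ===== VERDICT (by name: the statement is the Claim_ definition above) =====
theorem get_cluster_pos_spec : Claim_equal_get_cluster_pos := by
  intro read_list strand _ hpre
  unfold Spec_get_cluster_pos get_cluster_pos get_cluster_pos_alt
  by_cases h : strand == "lead" <;>
    simp only [h, if_true, if_false, Bool.false_eq_true,
      min_eq_sorted_head read_list (fun x => x.1) hpre,
      min_eq_sorted_head read_list (fun x => x.2) hpre,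
      max_eq_sorted_last read_list (fun x => x.1) hpre,
      max_eq_sorted_last read_list (fun x => x.2) hpre]
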